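-- pv_equiv track=rewrite | github.com/cbratkovics/fantasy-football-ai | backend/api/players.py | calculate_player_tier
-- ===== SOURCE A (Python) =====
-- def calculate_player_tier(position: str, rank_index: int) -> tuple[int, str]:
--     """Calculate player tier based on position and ranking"""
--
--     # Position-specific tier sizes
--     tier_sizes = {
--         "QB": [3, 6, 9, 12, 18, 24],  # Top 3 are tier 1, next 3 are tier 2, etc.
--         "RB": [5, 10, 15, 24, 36, 48],
--         "WR": [5, 10, 15, 24, 36, 48],
--         "TE": [3, 6, 9, 12, 18, 24],
--         "K": [3, 6, 10, 15, 20, 32],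
--         "DEF": [3, 6, 10, 15, 20, 32]
--     }
--
--     tier_labels = [
--         "Elite - Round 1-2",
--         "Strong - Round 3-4",
--         "Solid - Round 5-7",
--         "Good - Round 8-10",
--         "Depth - Round 11-13",
--         "Bench - Round 14+"
--     ]
--
--     sizes = tier_sizes.get(position, tier_sizes["WR"])
--
--     current_tier = 1
--     for size in sizes:
--         if rank_index < size:
--             return current_tier, tier_labels[current_tier - 1]
--         current_tier += 1
--
--     return len(tier_labels), tier_labels[-1]
-- ===== SOURCE B (Python) =====
-- def calculate_player_tier(position: str, rank_index: int) -> tuple[int, str]: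
--     """Calculate player tier based on position and ranking"""
--
--     tier_sizes = {
--         "QB": [3, 6, 9, 12, 18, 24],
--         "RB": [5, 10, 15, 24, 36, 48],
--         "WR": [5, 10, 15, 24, 36, 48],
--         "TE": [3, 6, 9, 12, 18, 24],
--         "K": [3, 6, 10, 15, 20, 32],
--         "DEF": [3, 6, 10, 15, 20, 32]
--     }
--
--     tier_labels = [
--         "Elite - Round 1-2",
--         "Strong - Round 3-4",
--         "Solid - Round 5-7",
--         "Good - Round 8-10",
--         "Depth - Round 11-13",
--         "Bench - Round 14+"
--     ]
--
--     sizes = tier_sizes.get(position, tier_sizes["WR"])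
--
--     # binary search: idx = number of thresholds <= rank_index (bisect_right)
--     lo, hi = 0, len(sizes)
--     while lo < hi:
--         mid = (lo + hi) // 2
--         if rank_index < sizes[mid]:
--             hi = mid
--         else:
--             lo = mid + 1
--
--     return min(lo + 1, len(tier_labels)), tier_labels[min(lo, len(tier_labels) - 1)]
-- ===== Notes on version B (the rewrite author's own statement) =====
-- stated objective: alternative
-- what changed: Replaced the linear scan that accumulates a tier counter with a hand-written binary search (bisect_right) over the sorted threshold list, assembling tier and label directly from the resulting index with capped arithmetic.
import Mathlib
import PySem

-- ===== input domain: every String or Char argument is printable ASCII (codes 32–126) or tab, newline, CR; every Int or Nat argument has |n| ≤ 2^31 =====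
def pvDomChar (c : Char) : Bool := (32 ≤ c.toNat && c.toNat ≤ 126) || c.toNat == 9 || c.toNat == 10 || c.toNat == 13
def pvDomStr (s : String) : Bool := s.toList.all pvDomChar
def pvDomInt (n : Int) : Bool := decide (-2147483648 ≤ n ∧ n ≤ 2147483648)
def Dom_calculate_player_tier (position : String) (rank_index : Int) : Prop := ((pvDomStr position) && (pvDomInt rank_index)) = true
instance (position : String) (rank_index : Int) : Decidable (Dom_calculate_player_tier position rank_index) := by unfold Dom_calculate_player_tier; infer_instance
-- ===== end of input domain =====

-- B replaces A's linear counter-accumulating scan by a binary search over the sorted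
-- thresholds (objective: alternative; same return value on every input).

def pvTierSizes : PySem.Dict String (List Int) :=
  PySem.Dict.ofList
    [("QB", [3, 6, 9, 12, 18, 24]),
     ("RB", [5, 10, 15, 24, 36, 48]),
     ("WR", [5, 10, 15, 24, 36, 48]),
     ("TE", [3, 6, 9, 12, 18, 24]),
     ("K",  [3, 6, 10, 15, 20, 32]),
     ("DEF", [3, 6, 10, 15, 20, 32])]

def pvTierLabels : List String :=
  ["Elite - Round 1-2",
   "Strong - Round 3-4",
   "Solid - Round 5-7",
   "Good - Round 8-10",
   "Depth - Round 11-13",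
   "Bench - Round 14+"]

-- ===== PORT A =====
-- the for-loop with early return and the 'current_tier' counter;
-- tier_labels[current_tier - 1] is always in range (1 ≤ current_tier ≤ 6), so '.getD ""' is never hit
def pvALoop (sizes : List Int) (rank_index : Int) (current_tier : Int) : Int × String :=
  match sizes with
  | [] => ((pvTierLabels.length : Int), (PySem.List.pyGet? pvTierLabels (-1)).getD "")
  | size :: rest =>
      if rank_index < size then
        (current_tier, (PySem.List.pyGet? pvTierLabels (current_tier - 1)).getD "")
      else
        pvALoop rest rank_index (current_tier + 1)

def calculate_player_tier (position : String) (rank_index : Int) : Int × String :=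
  -- tier_sizes.get(position, tier_sizes["WR"]); the "WR" lookup always succeeds, '.getD []' is never hit
  let sizes := PySem.Dict.getD pvTierSizes position ((PySem.Dict.get? pvTierSizes "WR").getD [])
  pvALoop sizes rank_index 1

-- ===== PORT B =====
-- hand-written bisect_right: while lo < hi: mid = (lo+hi)//2; …
-- sizes[mid] is always in range (mid < hi ≤ len(sizes)), so '.getD 0' is never hit
def pvBisect (xs : List Int) (x : Int) (lo hi : Nat) : Nat :=
  if _h : lo < hi then
    let mid := (lo + hi) / 2
    if x < xs.getD mid 0 then pvBisect xs x lo mid else pvBisect xs x (mid + 1) hi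
  else lo
termination_by hi - lo
decreasing_by all_goals omega

def calculate_player_tier_alt (position : String) (rank_index : Int) : Int × String :=
  let sizes := PySem.Dict.getD pvTierSizes position ((PySem.Dict.get? pvTierSizes "WR").getD [])
  let lo := pvBisect sizes rank_index 0 sizes.length
  (min ((lo : Int) + 1) (pvTierLabels.length : Int),
   pvTierLabels.getD (min lo (pvTierLabels.length - 1)) "")

-- ===== PRECONDITION & SPEC =====
def Spec_calculate_player_tier (position : String) (rank_index : Int) (out : Int × String) : Prop := out = calculate_player_tier_alt position rank_index
instance (position : String) (rank_index : Int) (out : Int × String) : Decidable (Spec_calculate_player_tier position rank_index out) := by unfold Spec_calculate_player_tier; infer_instance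

-- ===== CLAIM (what is proved, stated in full; the proofs are below) =====
def Claim_equal_calculate_player_tier : Prop := ∀ (position : String) (rank_index : Int), Dom_calculate_player_tier position rank_index → Spec_calculate_player_tier position rank_index (calculate_player_tier position rank_index)

-- ===== LEMMAS AND PROOFS =====

lemma pvBisect_stop (xs : List Int) (x : Int) (lo : Nat) : pvBisect xs x lo lo = lo := by
  rw [pvBisect]; simp

lemma pvBisect_step (xs : List Int) (x : Int) (lo hi : Nat) (h : lo < hi) :
    pvBisect xs x lo hi =
      if x < xs.getD ((lo + hi) / 2) 0 then pvBisect xs x lo ((lo + hi) / 2)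
      else pvBisect xs x ((lo + hi) / 2 + 1) hi := by
  rw [pvBisect]; simp [h]

-- closed form of the binary search on a six-element list
lemma pvBisect_six (a b c d e f r : Int) :
    pvBisect [a, b, c, d, e, f] r 0 6 =
      if r < d then (if r < b then (if r < a then 0 else 1) else (if r < c then 2 else 3))
      else (if r < f then (if r < e then 4 else 5) else 6) := by
  have h01 : pvBisect [a, b, c, d, e, f] r 0 1 = if r < a then 0 else 1 := by
    rw [pvBisect_step _ _ _ _ (by norm_num)]; norm_num [List.getD]
    rw [pvBisect_stop, pvBisect_stop]
  have h23 : pvBisect [a, b, c, d, e, f] r 2 3 = if r < c then 2 else 3 := by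
    rw [pvBisect_step _ _ _ _ (by norm_num)]; norm_num [List.getD]
    rw [pvBisect_stop, pvBisect_stop]
  have h03 : pvBisect [a, b, c, d, e, f] r 0 3 =
      if r < b then (if r < a then 0 else 1) else (if r < c then 2 else 3) := by
    rw [pvBisect_step _ _ _ _ (by norm_num)]; norm_num [List.getD]
    rw [h01, h23]
  have h45 : pvBisect [a, b, c, d, e, f] r 4 5 = if r < e then 4 else 5 := by
    rw [pvBisect_step _ _ _ _ (by norm_num)]; norm_num [List.getD]
    rw [pvBisect_stop, pvBisect_stop]
  have h46 : pvBisect [a, b, c, d, e, f] r 4 6 = if r < f then (if r < e then 4 else 5) else 6 := by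
    rw [pvBisect_step _ _ _ _ (by norm_num)]; norm_num [List.getD]
    rw [h45, pvBisect_stop]
  rw [pvBisect_step _ _ _ _ (by norm_num)]; norm_num [List.getD]
  rw [h03, h46]

lemma pvTierSizes_items : pvTierSizes = PySem.Dict.mk
    [("QB", [3, 6, 9, 12, 18, 24]),
     ("RB", [5, 10, 15, 24, 36, 48]),
     ("WR", [5, 10, 15, 24, 36, 48]),
     ("TE", [3, 6, 9, 12, 18, 24]),
     ("K",  [3, 6, 10, 15, 20, 32]),
     ("DEF", [3, 6, 10, 15, 20, 32])] := by rfl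

-- the only threshold lists the dict lookup can produce
lemma pv_sizes_cases (position : String) :
    PySem.Dict.getD pvTierSizes position ((PySem.Dict.get? pvTierSizes "WR").getD []) = [3, 6, 9, 12, 18, 24]
    ∨ PySem.Dict.getD pvTierSizes position ((PySem.Dict.get? pvTierSizes "WR").getD []) = [5, 10, 15, 24, 36, 48]
    ∨ PySem.Dict.getD pvTierSizes position ((PySem.Dict.get? pvTierSizes "WR").getD []) = [3, 6, 10, 15, 20, 32] := by
  simp only [pvTierSizes_items, PySem.Dict.getD, PySem.Dict.get?_mk_cons]
  split_ifs <;> simp_all [PySem.Dict.get?]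

-- the scan and the binary search agree on any strictly increasing six-element threshold list
lemma pv_core_six (a b c d e f r : Int) (hab : a < b) (hbc : b < c) (hcd : c < d)
    (hde : d < e) (hef : e < f) :
    pvALoop [a, b, c, d, e, f] r 1 =
      (min ((pvBisect [a, b, c, d, e, f] r 0 ([a, b, c, d, e, f] : List Int).length : Int) + 1) (pvTierLabels.length : Int),
       pvTierLabels.getD (min (pvBisect [a, b, c, d, e, f] r 0 ([a, b, c, d, e, f] : List Int).length) (pvTierLabels.length - 1)) "") := by
  rw [show ([a, b, c, d, e, f] : List Int).length = 6 from rfl, pvBisect_six]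
  simp only [pvALoop, pvTierLabels, PySem.List.pyGet?, PySem.List.pyIdx?]
  by_cases h1 : r < a
  · simp [h1, show r < b from by omega, show r < d from by omega]
  by_cases h2 : r < b
  · simp [h1, h2, show r < d from by omega]
  by_cases h3 : r < c
  · simp [h1, h2, h3, show r < d from by omega]
  by_cases h4 : r < d
  · simp [h1, h2, h3, h4]
  by_cases h5 : r < e
  · simp [h1, h2, h3, h4, h5, show r < f from by omega]
  by_cases h6 : r < f
  · simp [h1, h2, h3, h4, h5, h6]
  · simp [h1, h2, h3, h4, h5, h6]

-- the scan and the binary search agree on each possible threshold list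
lemma pv_core_eq (L : List Int) (r : Int)
    (hL : L = [3, 6, 9, 12, 18, 24] ∨ L = [5, 10, 15, 24, 36, 48] ∨ L = [3, 6, 10, 15, 20, 32]) :
    pvALoop L r 1 =
      (min ((pvBisect L r 0 L.length : Int) + 1) (pvTierLabels.length : Int),
       pvTierLabels.getD (min (pvBisect L r 0 L.length) (pvTierLabels.length - 1)) "") := by
  rcases hL with rfl | rfl | rfl <;> exact pv_core_six _ _ _ _ _ _ r (by norm_num) (by norm_num)
    (by norm_num) (by norm_num) (by norm_num)

-- ===== VERDICT (by name: the statement is the Claim_ definition above) =====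
theorem calculate_player_tier_spec : Claim_equal_calculate_player_tier := by
  intro position rank_index _
  unfold Spec_calculate_player_tier calculate_player_tier calculate_player_tier_alt
  exact pv_core_eq _ rank_index (pv_sizes_cases position)
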